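-- pv_equiv track=rewrite | github.com/ZrjaK/algorithm | OJ/leetcode/2321.拼接数组的最大分数.py | maximumsSplicedArray
-- ===== SOURCE A (Python) =====
-- from typing import List
--
-- def maximumsSplicedArray(nums1: List[int], nums2: List[int]) -> int:
--     def p(a):
--         res, dp = 0, 0
--         for i in a:
--             dp += i
--             if dp < 0:
--                 dp = 0
--             res = max(res, dp)
--         return res
--     n = len(nums1)
--     f = [0] * n
--
--     s = 0
--     for i in range(n):
--         f[i] = nums2[i] - nums1[i]
--         s += nums1[i]
--     ans = s + p(f)
--
--     s = 0
--     for i in range(n):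
--         f[i] = nums1[i] - nums2[i]
--         s += nums2[i]
--     ans = max(ans, s + p(f))
--     return ans
-- ===== SOURCE B (Python) =====
-- from typing import List
--
-- def maximumsSplicedArray(nums1: List[int], nums2: List[int]) -> int:
--     # one fused pass: prefix sums + running minimum prefix for both directions at once
--     s1 = s2 = p1 = m1 = b1 = p2 = m2 = b2 = 0
--     for i in range(len(nums1)):
--         x, y = nums1[i], nums2[i]
--         s1 += x
--         s2 += y
--         p1 += y - x
--         if p1 < m1:
--             m1 = p1
--         if p1 - m1 > b1:
--             b1 = p1 - m1
--         p2 += x - y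
--         if p2 < m2:
--             m2 = p2
--         if p2 - m2 > b2:
--             b2 = p2 - m2
--     return max(s1 + b1, s2 + b2)
-- ===== Notes on version B (the rewrite author's own statement) =====
-- stated objective: faster
-- what changed: Replaces A's build-a-diff-array-then-Kadane (three index loops plus a helper, run twice over a rebuilt array) with a single fused pass maintaining, for both directions at once, the running sums, the prefix sums of the difference arrays and their running minimum prefixes, taking best = max(best, prefix - minPrefix).
import Mathlib
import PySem

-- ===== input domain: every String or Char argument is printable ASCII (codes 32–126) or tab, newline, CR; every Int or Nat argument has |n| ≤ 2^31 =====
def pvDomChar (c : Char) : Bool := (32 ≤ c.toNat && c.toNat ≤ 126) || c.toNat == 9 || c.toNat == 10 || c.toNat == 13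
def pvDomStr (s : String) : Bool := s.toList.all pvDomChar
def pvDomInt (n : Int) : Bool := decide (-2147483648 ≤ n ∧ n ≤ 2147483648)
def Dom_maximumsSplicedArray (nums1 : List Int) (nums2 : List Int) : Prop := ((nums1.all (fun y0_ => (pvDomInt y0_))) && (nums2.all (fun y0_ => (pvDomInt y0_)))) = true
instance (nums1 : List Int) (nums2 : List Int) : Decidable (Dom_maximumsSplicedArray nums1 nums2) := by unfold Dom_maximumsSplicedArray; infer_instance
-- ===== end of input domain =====

-- B replaces A's build-diff-array-then-Kadane (three index loops + helper, run twice over a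
-- rebuilt array) with one fused index pass keeping prefix sums and running minimum prefixes
-- for both directions at once (same O(n); constant-factor change).


-- ===== PORT A =====
-- inner helper p(a): Kadane with res,dp = 0,0
def pvA_p (a : List Int) : Int :=
  (a.foldl (fun (st : Int × Int) i =>
      let dp := st.2 + i
      let dp := if dp < 0 then 0 else dp
      (max st.1 dp, dp)) (0, 0)).1

-- body of 'for i in range(n): f[i] = b[i] - a[i]; s += a[i]'  (state = (f, s))
def pvA_loop (a b : List Int) (n : Int) (f0 : List Int) : List Int × Int :=
  (PySem.List.pyRange 0 n 1).foldl
    (fun (st : List Int × Int) i =>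
      (st.1.set i.toNat (PySem.List.pyGetD b i 0 - PySem.List.pyGetD a i 0),
       st.2 + PySem.List.pyGetD a i 0))
    (f0, 0)

def maximumsSplicedArray (nums1 : List Int) (nums2 : List Int) : Int :=
  let n : Int := (nums1.length : Int)
  let f : List Int := List.replicate nums1.length 0
  let r1 := pvA_loop nums1 nums2 n f
  let ans := r1.2 + pvA_p r1.1
  let r2 := pvA_loop nums2 nums1 n r1.1
  max ans (r2.2 + pvA_p r2.1)

-- ===== PORT B =====
def pvB_step (st : Int × Int × Int × Int × Int × Int × Int × Int) (xy : Int × Int) :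
    Int × Int × Int × Int × Int × Int × Int × Int :=
  let s1 := st.1 + xy.1
  let s2 := st.2.1 + xy.2
  let p1 := st.2.2.1 + (xy.2 - xy.1)
  let m1 := if p1 < st.2.2.2.1 then p1 else st.2.2.2.1
  let b1 := if p1 - m1 > st.2.2.2.2.1 then p1 - m1 else st.2.2.2.2.1
  let p2 := st.2.2.2.2.2.1 + (xy.1 - xy.2)
  let m2 := if p2 < st.2.2.2.2.2.2.1 then p2 else st.2.2.2.2.2.2.1
  let b2 := if p2 - m2 > st.2.2.2.2.2.2.2 then p2 - m2 else st.2.2.2.2.2.2.2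
  (s1, s2, p1, m1, b1, p2, m2, b2)

def maximumsSplicedArray_alt (nums1 : List Int) (nums2 : List Int) : Int :=
  let st := (PySem.List.pyRange 0 (nums1.length : Int) 1).foldl
    (fun st i => pvB_step st (PySem.List.pyGetD nums1 i 0, PySem.List.pyGetD nums2 i 0))
    (0, 0, 0, 0, 0, 0, 0, 0)
  max (st.1 + st.2.2.2.2.1) (st.2.1 + st.2.2.2.2.2.2.2)

-- ===== PRECONDITION & SPEC =====
-- Pre_ excludes exactly the inputs with len(nums2) < len(nums1), on which A raises IndexError
-- (B's index loop raises there too).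
def Pre_maximumsSplicedArray (nums1 : List Int) (nums2 : List Int) : Prop :=
  nums1.length ≤ nums2.length
instance (nums1 : List Int) (nums2 : List Int) : Decidable (Pre_maximumsSplicedArray nums1 nums2) := by
  unfold Pre_maximumsSplicedArray; infer_instance

def pvWitness_maximumsSplicedArray : List Int × List Int := ([60, -2, 3], [1, 50, -4])

def Spec_maximumsSplicedArray (nums1 : List Int) (nums2 : List Int) (out : Int) : Prop := out = maximumsSplicedArray_alt nums1 nums2
instance (nums1 : List Int) (nums2 : List Int) (out : Int) : Decidable (Spec_maximumsSplicedArray nums1 nums2 out) := by unfold Spec_maximumsSplicedArray; infer_instance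

-- ===== CLAIM (what is proved, stated in full; the proofs are below) =====
def Claim_equal_maximumsSplicedArray : Prop := ∀ (nums1 : List Int) (nums2 : List Int), Dom_maximumsSplicedArray nums1 nums2 → Pre_maximumsSplicedArray nums1 nums2 → Spec_maximumsSplicedArray nums1 nums2 (maximumsSplicedArray nums1 nums2)

-- ===== LEMMAS AND PROOFS =====

-- generalized A-Kadane fold, for the invariant proof
def pvA_pfold (a : List Int) (st : Int × Int) : Int × Int :=
  a.foldl (fun (st : Int × Int) i =>
      let dp := st.2 + i
      let dp := if dp < 0 then 0 else dp
      (max st.1 dp, dp)) st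

lemma pvA_p_eq (a : List Int) : pvA_p a = (pvA_pfold a (0, 0)).1 := rfl

-- B's index fold equals the fold of pvB_step over the zip
lemma bfold_zip (nums1 nums2 : List Int) (n : Nat)
    (hna : n ≤ nums1.length) (hnb : n ≤ nums2.length)
    (init : Int × Int × Int × Int × Int × Int × Int × Int) :
    (PySem.List.pyRange 0 (n : Int) 1).foldl
      (fun st i => pvB_step st (PySem.List.pyGetD nums1 i 0, PySem.List.pyGetD nums2 i 0)) init
    = ((nums1.zip nums2).take n).foldl pvB_step init := by
  induction n with
  | zero => simp [PySem.List.pyRange]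
  | succ k ih =>
    have hka : k ≤ nums1.length := Nat.le_of_succ_le hna
    have hkb : k ≤ nums2.length := Nat.le_of_succ_le hnb
    have hsplit : PySem.List.pyRange 0 ((k + 1 : Nat) : Int) 1 =
        PySem.List.pyRange 0 (k : Int) 1 ++ [(k : Int)] := by
      have := PySem.List.pyRange_one_succ_right (a := 0) (b := (k : Int)) (Int.natCast_nonneg k)
      rw [show ((k + 1 : Nat) : Int) = (k : Int) + 1 by push_cast; ring]
      exact this
    rw [hsplit, List.foldl_append, ih hka hkb]
    have hzlen : k < (nums1.zip nums2).length := by simp [List.length_zip]; omega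
    have htake : (nums1.zip nums2).take (k + 1) =
        (nums1.zip nums2).take k ++ [(nums1.zip nums2)[k]'hzlen] := by
      rw [List.take_add_one, List.getElem?_eq_getElem hzlen]; rfl
    rw [htake, List.foldl_append]
    simp only [List.foldl_cons, List.foldl_nil]
    congr 1
    have hga : PySem.List.pyGetD nums1 (k : Int) 0 = nums1[k]'(by omega) := by
      rw [PySem.List.pyGetD_natCast]
      simp [List.getD, List.getElem?_eq_getElem (by omega : k < nums1.length)]
    have hgb : PySem.List.pyGetD nums2 (k : Int) 0 = nums2[k]'(by omega) := by
      rw [PySem.List.pyGetD_natCast]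
      simp [List.getD, List.getElem?_eq_getElem (by omega : k < nums2.length)]
    rw [hga, hgb, List.getElem_zip]

-- B's zip fold, characterized: sums accumulate, and (best, prefix - minPrefix) tracks A's Kadane state
lemma bkey (z : List (Int × Int)) :
    ∀ s1 s2 p1 m1 b1 p2 m2 b2 : Int,
    ∃ p1' m1' p2' m2' : Int,
      z.foldl pvB_step (s1, s2, p1, m1, b1, p2, m2, b2) =
        (s1 + (z.map Prod.fst).sum, s2 + (z.map Prod.snd).sum,
         p1', m1', (pvA_pfold (z.map (fun xy => xy.2 - xy.1)) (b1, p1 - m1)).1,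
         p2', m2', (pvA_pfold (z.map (fun xy => xy.1 - xy.2)) (b2, p2 - m2)).1)
      ∧ p1' - m1' = (pvA_pfold (z.map (fun xy => xy.2 - xy.1)) (b1, p1 - m1)).2
      ∧ p2' - m2' = (pvA_pfold (z.map (fun xy => xy.1 - xy.2)) (b2, p2 - m2)).2 := by
  induction z with
  | nil =>
    intro s1 s2 p1 m1 b1 p2 m2 b2
    exact ⟨p1, m1, p2, m2, by simp [pvA_pfold], by simp [pvA_pfold], by simp [pvA_pfold]⟩
  | cons xy z ih =>
    intro s1 s2 p1 m1 b1 p2 m2 b2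
    obtain ⟨x, y⟩ := xy
    simp only [List.foldl_cons, List.map_cons]
    have hstep : pvB_step (s1, s2, p1, m1, b1, p2, m2, b2) (x, y) =
        (s1 + x, s2 + y, p1 + (y - x), min m1 (p1 + (y - x)),
         max b1 (p1 + (y - x) - min m1 (p1 + (y - x))),
         p2 + (x - y), min m2 (p2 + (x - y)),
         max b2 (p2 + (x - y) - min m2 (p2 + (x - y)))) := by
      simp only [pvB_step]
      simp only [Prod.mk.injEq]
      and_intros <;> first | trivial | (split_ifs <;> omega)
    rw [hstep]
    obtain ⟨p1', m1', p2', m2', heq, h1, h2⟩ :=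
      ih (s1 + x) (s2 + y) (p1 + (y - x)) (min m1 (p1 + (y - x)))
        (max b1 (p1 + (y - x) - min m1 (p1 + (y - x))))
        (p2 + (x - y)) (min m2 (p2 + (x - y)))
        (max b2 (p2 + (x - y) - min m2 (p2 + (x - y))))
    refine ⟨p1', m1', p2', m2', ?_, ?_, ?_⟩
    · rw [heq]
      have e1 : pvA_pfold ((y - x) :: z.map (fun xy => xy.2 - xy.1)) (b1, p1 - m1) =
          pvA_pfold (z.map (fun xy => xy.2 - xy.1))
            (max b1 (p1 + (y - x) - min m1 (p1 + (y - x))),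
             p1 + (y - x) - min m1 (p1 + (y - x))) := by
        simp only [pvA_pfold, List.foldl_cons]
        congr 1
        dsimp only
        simp only [Prod.mk.injEq]
        and_intros <;> first | trivial | (split_ifs <;> omega)
      have e2 : pvA_pfold ((x - y) :: z.map (fun xy => xy.1 - xy.2)) (b2, p2 - m2) =
          pvA_pfold (z.map (fun xy => xy.1 - xy.2))
            (max b2 (p2 + (x - y) - min m2 (p2 + (x - y))),
             p2 + (x - y) - min m2 (p2 + (x - y))) := by
        simp only [pvA_pfold, List.foldl_cons]
        congr 1
        dsimp only
        simp only [Prod.mk.injEq]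
        and_intros <;> first | trivial | (split_ifs <;> omega)
      rw [e1, e2]
      simp only [List.sum_cons]
      ring_nf
    · rw [h1]
      congr 1
      simp only [pvA_pfold, List.foldl_cons]
      congr 1
      dsimp only
      simp only [Prod.mk.injEq]
      and_intros <;> first | trivial | (split_ifs <;> omega)
    · rw [h2]
      congr 1
      simp only [pvA_pfold, List.foldl_cons]
      congr 1
      dsimp only
      simp only [Prod.mk.injEq]
      and_intros <;> first | trivial | (split_ifs <;> omega)

-- A's index loop builds the diff array of the zip prefix and sums the indexed prefix of a
lemma build_loop (a b : List Int) (n : Nat) (f0 : List Int)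
    (hna : n ≤ a.length) (hnb : n ≤ b.length) (hf : n ≤ f0.length) :
    pvA_loop a b (n : Int) f0 =
      (((a.zip b).take n).map (fun xy => xy.2 - xy.1) ++ f0.drop n,
       (a.take n).sum) := by
  induction n with
  | zero => simp [pvA_loop]
  | succ k ih =>
    have hka : k ≤ a.length := Nat.le_of_succ_le hna
    have hkb : k ≤ b.length := Nat.le_of_succ_le hnb
    have hkf : k ≤ f0.length := Nat.le_of_succ_le hf
    have hsplit : PySem.List.pyRange 0 ((k + 1 : Nat) : Int) 1 =
        PySem.List.pyRange 0 (k : Int) 1 ++ [(k : Int)] := by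
      have := PySem.List.pyRange_one_succ_right (a := 0) (b := (k : Int)) (Int.natCast_nonneg k)
      rw [show ((k + 1 : Nat) : Int) = (k : Int) + 1 by push_cast; ring]
      exact this
    have ihr := ih hka hkb hkf
    simp only [pvA_loop] at ihr ⊢
    rw [hsplit, List.foldl_append, ihr]
    simp only [List.foldl_cons, List.foldl_nil]
    have hga : PySem.List.pyGetD a (k : Int) 0 = a[k]'(by omega) := by
      rw [PySem.List.pyGetD_natCast]
      simp [List.getD, List.getElem?_eq_getElem (by omega : k < a.length)]
    have hgb : PySem.List.pyGetD b (k : Int) 0 = b[k]'(by omega) := by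
      rw [PySem.List.pyGetD_natCast]
      simp [List.getD, List.getElem?_eq_getElem (by omega : k < b.length)]
    have hzlen : k < (a.zip b).length := by simp [List.length_zip]; omega
    simp only [Prod.mk.injEq]
    constructor
    · -- the set at index k
      rw [hga, hgb]
      have hlen : (((a.zip b).take k).map (fun xy => xy.2 - xy.1)).length = k := by
        simp [List.length_take, List.length_zip]; omega
      have hset : ∀ (l1 l2 : List Int) (v : Int), l1.length = k →
          (l1 ++ l2).set ((k : Int)).toNat v = l1 ++ l2.set 0 v := by
        intro l1 l2 v h
        rw [Int.toNat_natCast, List.set_append]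
        simp [h]
      rw [hset _ _ _ hlen]
      have hdrop : f0.drop k = f0[k]'(by omega) :: f0.drop (k + 1) := by
        rw [List.drop_eq_getElem_cons (by omega)]
      rw [hdrop]
      simp only [List.set_cons_zero]
      have htake : (a.zip b).take (k + 1) = (a.zip b).take k ++ [(a.zip b)[k]'hzlen] := by
        rw [List.take_add_one, List.getElem?_eq_getElem hzlen]; rfl
      rw [htake, List.map_append]
      simp [List.getElem_zip]
    · -- the sum
      rw [hga]
      have : a.take (k + 1) = a.take k ++ [a[k]'(by omega)] := by
        rw [List.take_add_one, List.getElem?_eq_getElem (by omega : k < a.length)]; rfl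
      rw [this, List.sum_append]; simp

lemma map_snd_zip_sum (a b : List Int) : ((a.zip b).map Prod.snd) = b.take a.length := by
  induction a generalizing b with
  | nil => simp
  | cons x a ih => cases b with
    | nil => simp
    | cons y b => simp [ih]

lemma map_fst_zip_eq (a b : List Int) (h : a.length ≤ b.length) :
    (a.zip b).map Prod.fst = a := List.map_fst_zip h

-- ===== VERDICT (by name: the statement is the Claim_ definition above) =====
theorem maximumsSplicedArray_spec : Claim_equal_maximumsSplicedArray := by
  intro nums1 nums2 _ hpre
  unfold Spec_maximumsSplicedArray
  unfold Pre_maximumsSplicedArray at hpre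
  set z := nums1.zip nums2 with hz
  have hzlen : z.length = nums1.length := by simp [hz, List.length_zip]; omega
  -- A's side
  have h1 := build_loop nums1 nums2 nums1.length (List.replicate nums1.length 0)
      (le_refl _) hpre (by simp)
  have htz : z.take nums1.length = z := by rw [← hzlen]; exact List.take_length ..
  have hfz1 : (((nums1.zip nums2).take nums1.length).map (fun xy => xy.2 - xy.1)) =
      z.map (fun xy => xy.2 - xy.1) := by rw [← hz, htz]
  have h2 := build_loop nums2 nums1 nums1.length
      (z.map (fun xy => xy.2 - xy.1) ++ (List.replicate nums1.length 0).drop nums1.length)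
      hpre (le_refl _) (by simp [hzlen])
  have hz21 : ((nums2.zip nums1).take nums1.length).map (fun xy => xy.2 - xy.1) =
      z.map (fun xy => xy.1 - xy.2) := by
    have hlen21 : (nums2.zip nums1).length = nums1.length := by
      simp [List.length_zip]; omega
    rw [← hlen21, List.take_length]
    have hswap : nums2.zip nums1 = z.map Prod.swap := by
      rw [hz, ← List.zip_swap]
    rw [hswap, List.map_map]
    simp [Function.comp, Prod.swap]
  rw [hz21] at h2
  -- B's side: index fold = zip fold, then bkey
  have hb := bfold_zip nums1 nums2 nums1.length (le_refl _) hpre (0, 0, 0, 0, 0, 0, 0, 0)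
  rw [← hz, htz] at hb
  obtain ⟨p1', m1', p2', m2', heq, -, -⟩ := bkey z 0 0 0 0 0 0 0 0
  simp only [maximumsSplicedArray, maximumsSplicedArray_alt]
  rw [hb, heq, h1, hfz1, h2]
  simp only [pvA_p_eq]
  have hs1 : (z.map Prod.fst).sum = (nums1.take nums1.length).sum := by
    rw [hz, map_fst_zip_eq _ _ hpre, List.take_length]
  have hs2 : (z.map Prod.snd).sum = (nums2.take nums1.length).sum := by
    rw [hz, map_snd_zip_sum]
  simp only [hs1, hs2]
  have hd1 : List.drop nums1.length (List.replicate nums1.length (0 : Int)) = [] := by simp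
  have hd2 : List.drop nums1.length (z.map (fun xy => xy.2 - xy.1)) = [] :=
    List.drop_eq_nil_of_le (by simp [hzlen])
  rw [hd1]
  simp only [List.append_nil]
  rw [hd2]
  simp only [List.append_nil]
  norm_num
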